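-- pv_equiv track=rewrite | github.com/d031182/steel_thread_on_sap | scripts/python/rebuild_sqlite_from_csn copy.py | csn_type_to_sqlite
-- ===== SOURCE A (Python) =====
-- from typing import List, Dict, Optional
--
-- def csn_type_to_sqlite(csn_type: str, length: Optional[int] = None) -> str:
--     """Convert CSN/CDS type to SQLite type"""
--     if not csn_type:
--         return 'TEXT'
--
--     csn_type_lower = csn_type.lower()
--
--     # String types
--     if 'string' in csn_type_lower or csn_type_lower in ['cds.string']:
--         return 'TEXT'
--
--     # Integer types
--     if 'int' in csn_type_lower or csn_type_lower in ['cds.integer', 'cds.integer64']: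
--         return 'INTEGER'
--
--     # Decimal types
--     if 'decimal' in csn_type_lower or csn_type_lower in ['cds.decimal', 'cds.decimalfloat']:
--         return 'REAL'
--
--     # Date/time types
--     if any(x in csn_type_lower for x in ['date', 'time', 'timestamp']):
--         return 'TEXT'
--
--     # Boolean
--     if 'boolean' in csn_type_lower:
--         return 'INTEGER'
--
--     return 'TEXT'
-- ===== SOURCE B (Python) =====
-- # Data-driven rewrite: the if-chain becomes an ordered rule table scanned for the
-- # first matching keyword; the redundant exact-name checks of A (`cds.string` etc.,
-- # all subsumed by the substring tests) disappear.
-- _RULES = [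
--     (('string',), 'TEXT'),
--     (('int',), 'INTEGER'),
--     (('decimal',), 'REAL'),
--     (('date', 'time', 'timestamp'), 'TEXT'),
--     (('boolean',), 'INTEGER'),
-- ]
--
--
-- def csn_type_to_sqlite(csn_type, length=None):
--     if not csn_type:
--         return 'TEXT'
--     t = csn_type.lower()
--     for keywords, sqlite_type in _RULES:
--         if any(k in t for k in keywords):
--             return sqlite_type
--     return 'TEXT'
-- ===== Notes on version B (the rewrite author's own statement) =====
-- stated objective: idiomatic
-- what changed: The if-elif branch chain is replaced by an ordered (keywords, type) rule table scanned for the first match, dropping A's redundant exact-name list checks which are subsumed by the substring tests.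
import Mathlib
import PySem

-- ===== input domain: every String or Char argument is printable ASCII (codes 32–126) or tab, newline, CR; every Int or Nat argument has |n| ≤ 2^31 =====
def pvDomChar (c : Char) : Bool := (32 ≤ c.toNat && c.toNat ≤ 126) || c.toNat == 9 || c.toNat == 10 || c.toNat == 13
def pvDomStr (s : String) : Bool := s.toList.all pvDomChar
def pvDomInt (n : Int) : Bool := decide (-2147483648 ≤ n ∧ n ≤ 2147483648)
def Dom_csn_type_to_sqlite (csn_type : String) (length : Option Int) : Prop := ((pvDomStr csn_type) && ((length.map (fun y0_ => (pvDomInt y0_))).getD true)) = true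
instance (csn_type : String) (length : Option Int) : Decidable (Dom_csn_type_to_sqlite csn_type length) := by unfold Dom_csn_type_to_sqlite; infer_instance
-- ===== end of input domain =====

-- B replaces A's if-elif chain by an ordered (keywords, type) rule table scanned
-- for the first match (idiomatic, same cost); return value proved equal on Dom.

-- ===== PORT A =====
def csn_type_to_sqlite (csn_type : String) (length : Option Int) : String :=
  if csn_type = "" then "TEXT"
  else
    let t := PySem.Str.lower csn_type
    if PySem.Str.isIn "string" t || t == "cds.string" then "TEXT"
    else if PySem.Str.isIn "int" t || (t == "cds.integer" || t == "cds.integer64") then "INTEGER"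
    else if PySem.Str.isIn "decimal" t || (t == "cds.decimal" || t == "cds.decimalfloat") then "REAL"
    else if (["date", "time", "timestamp"].any fun x => PySem.Str.isIn x t) then "TEXT"
    else if PySem.Str.isIn "boolean" t then "INTEGER"
    else "TEXT"

-- ===== PORT B =====
def pvRules : List (List String × String) :=
  [(["string"], "TEXT"), (["int"], "INTEGER"), (["decimal"], "REAL"),
   (["date", "time", "timestamp"], "TEXT"), (["boolean"], "INTEGER")]

def pvFirstMatch (t : String) : List (List String × String) → String
  | [] => "TEXT"
  | (kws, ty) :: rest => if kws.any (fun k => PySem.Str.isIn k t) then ty else pvFirstMatch t rest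

def csn_type_to_sqlite_alt (csn_type : String) (length : Option Int) : String :=
  if csn_type = "" then "TEXT"
  else pvFirstMatch (PySem.Str.lower csn_type) pvRules

-- ===== PRECONDITION & SPEC =====
def Spec_csn_type_to_sqlite (csn_type : String) (length : Option Int) (out : String) : Prop := out = csn_type_to_sqlite_alt csn_type length
instance (csn_type : String) (length : Option Int) (out : String) : Decidable (Spec_csn_type_to_sqlite csn_type length out) := by unfold Spec_csn_type_to_sqlite; infer_instance

-- ===== CLAIM (what is proved, stated in full; the proofs are below) =====
def Claim_equal_csn_type_to_sqlite : Prop := ∀ (csn_type : String) (length : Option Int), Dom_csn_type_to_sqlite csn_type length → Spec_csn_type_to_sqlite csn_type length (csn_type_to_sqlite csn_type length)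

-- ===== LEMMAS AND PROOFS =====

-- ===== VERDICT (by name: the statement is the Claim_ definition above) =====
theorem csn_type_to_sqlite_spec : Claim_equal_csn_type_to_sqlite := by
  unfold Claim_equal_csn_type_to_sqlite
  intro s len _
  unfold Spec_csn_type_to_sqlite csn_type_to_sqlite csn_type_to_sqlite_alt
  by_cases h0 : s = ""
  · simp [h0]
  · simp only [h0, if_false]
    set t := PySem.Str.lower s with ht
    simp only [pvRules, pvFirstMatch, List.any_cons, List.any_nil, Bool.or_false,
      PySem.Str.isIn_eq]
    by_cases h1 : PySem.Chars.isIn ['s','t','r','i','n','g'] t.toList = true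
    · simp [h1]
    · have e1 : ¬ t = "cds.string" := fun h => h1 (by rw [h]; decide)
      by_cases h2 : PySem.Chars.isIn ['i','n','t'] t.toList = true
      · simp [h1, e1, h2]
      · have e2 : ¬ t = "cds.integer" := fun h => h2 (by rw [h]; decide)
        have e2' : ¬ t = "cds.integer64" := fun h => h2 (by rw [h]; decide)
        by_cases h3 : PySem.Chars.isIn ['d','e','c','i','m','a','l'] t.toList = true
        · simp [h1, e1, h2, e2, e2', h3]
        · have e3 : ¬ t = "cds.decimal" := fun h => h3 (by rw [h]; decide)
          have e3' : ¬ t = "cds.decimalfloat" := fun h => h3 (by rw [h]; decide)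
          split_ifs with hd hb <;> simp_all
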